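-- pv_equiv track=rewrite | github.com/ch1102chiou/CSE1309x_UsingPython | assignment3.py | find_word_horizontal
-- ===== SOURCE A (Python) =====
-- def find_word_horizontal(crosswords,word):
--     rowIndex = 0
--     for row in crosswords:
--         string = ""
--         # transfer to each row to string
--         for c in row:
--             string = string + c
--         # if string contains a word
--         # return the colume and row index
--         colIndex = string.find(word)
--         if  colIndex != -1:
--             return [rowIndex, colIndex]
--         rowIndex = rowIndex + 1
--     # No match return None
--     return None
-- ===== SOURCE B (Python) =====
-- def find_word_horizontal(crosswords, word):
--     BASE, MOD = 256, 1000000007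
--     w = len(word)
--     hw = 0
--     for ch in word:
--         hw = (hw * BASE + ord(ch)) % MOD
--     pw = pow(BASE, w - 1, MOD) if w > 0 else 0
--     for rowIndex, row in enumerate(crosswords):
--         chars = "".join(row)
--         n = len(chars)
--         if w > n:
--             continue
--         if w == 0:
--             return [rowIndex, 0]
--         h = 0
--         for ch in chars[:w]:
--             h = (h * BASE + ord(ch)) % MOD
--         for col in range(n - w + 1):
--             if h == hw and chars[col:col + w] == word:
--                 return [rowIndex, col]
--             if col + w < n:
--                 h = ((h - ord(chars[col]) * pw) * BASE + ord(chars[col + w])) % MOD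
--     return None
-- ===== Notes on version B (the rewrite author's own statement) =====
-- stated objective: alternative
-- what changed: Replaces string concatenation plus str.find with a Rabin-Karp rolling-hash scan per row: a window hash is maintained incrementally and the actual slice is compared only on hash agreement.
import Mathlib
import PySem

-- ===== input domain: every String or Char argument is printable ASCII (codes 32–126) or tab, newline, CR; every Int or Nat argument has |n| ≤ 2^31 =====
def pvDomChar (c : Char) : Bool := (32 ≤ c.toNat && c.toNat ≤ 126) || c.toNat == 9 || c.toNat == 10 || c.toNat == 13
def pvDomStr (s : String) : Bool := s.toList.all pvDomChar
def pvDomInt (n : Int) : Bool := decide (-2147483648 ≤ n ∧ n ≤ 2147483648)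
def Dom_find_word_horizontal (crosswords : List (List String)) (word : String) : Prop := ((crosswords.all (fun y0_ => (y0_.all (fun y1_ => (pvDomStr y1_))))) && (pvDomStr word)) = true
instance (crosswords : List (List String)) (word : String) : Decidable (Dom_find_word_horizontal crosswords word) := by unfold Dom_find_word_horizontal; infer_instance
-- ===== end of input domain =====

-- B replaces string concatenation + str.find by a Rabin-Karp rolling-hash scan per row
-- (alternative algorithm; the slice is compared only when the window hash matches the word hash).

-- ===== PORT A =====
-- loop over rows carrying rowIndex; per row build the concatenated string, then str.find
def pvARows (rows : List (List String)) (word : String) (rowIndex : Int) : Option (List Int) :=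
  match rows with
  | [] => none
  | row :: rest =>
    let string := row.foldl (fun s c => s ++ c) ""
    let colIndex := PySem.Str.find string word
    if colIndex ≠ -1 then some [rowIndex, colIndex]
    else pvARows rest word (rowIndex + 1)

def find_word_horizontal (crosswords : List (List String)) (word : String) : Option (List Int) :=
  pvARows crosswords word 0

-- ===== PORT B =====
-- hash step of Source B: h = (h * BASE + ord(ch)) % MOD
def pvHStep (h : Int) (c : Char) : Int :=
  PySem.Int.mod (h * 256 + (c.toNat : Int)) 1000000007

-- inner 'for col in range(n - w + 1)' loop carrying the rolling hash h;
-- chars[col] / chars[col+w] are in range in Source B (col + w < n guards the roll), so getD is exact there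
def pvRKGo (chars word : List Char) (hw pw : Int) (h : Int) (col remaining : Nat) : Option Nat :=
  match remaining with
  | 0 => none
  | r + 1 =>
    if h = hw ∧ (chars.drop col).take word.length = word then some col
    else
      let h' :=
        if col + word.length < chars.length then
          PySem.Int.mod ((h - ((chars.getD col ' ').toNat : Int) * pw) * 256
            + ((chars.getD (col + word.length) ' ').toNat : Int)) 1000000007
        else h
      pvRKGo chars word hw pw h' (col + 1) r

-- outer 'for rowIndex, row in enumerate(crosswords)' loop
def pvAltRows (rows : List (List String)) (word : List Char) (hw pw : Int) (rowIndex : Nat) : Option (List Int) :=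
  match rows with
  | [] => none
  | row :: rest =>
    let chars := PySem.Chars.join [] (row.map String.toList)   -- "".join(row), on code points
    if word.length > chars.length then pvAltRows rest word hw pw (rowIndex + 1)
    else if word.length = 0 then some [(rowIndex : Int), 0]
    else
      let h := (chars.take word.length).foldl pvHStep 0        -- hash of chars[:w]
      match pvRKGo chars word hw pw h 0 (chars.length - word.length + 1) with
      | some col => some [(rowIndex : Int), (col : Int)]
      | none => pvAltRows rest word hw pw (rowIndex + 1)

def find_word_horizontal_alt (crosswords : List (List String)) (word : String) : Option (List Int) :=
  let w := word.toList
  let hw := w.foldl pvHStep 0                                  -- hash of word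
  let pw := if 0 < w.length then PySem.Int.powMod 256 (w.length - 1) 1000000007 else 0
  pvAltRows crosswords w hw pw 0

-- ===== PRECONDITION & SPEC =====
def Spec_find_word_horizontal (crosswords : List (List String)) (word : String) (out : Option (List Int)) : Prop := out = find_word_horizontal_alt crosswords word
instance (crosswords : List (List String)) (word : String) (out : Option (List Int)) : Decidable (Spec_find_word_horizontal crosswords word out) := by unfold Spec_find_word_horizontal; infer_instance

-- ===== CLAIM (what is proved, stated in full; the proofs are below) =====
def Claim_equal_find_word_horizontal : Prop := ∀ (crosswords : List (List String)) (word : String), Dom_find_word_horizontal crosswords word → Spec_find_word_horizontal crosswords word (find_word_horizontal crosswords word)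

-- ===== LEMMAS AND PROOFS =====

-- plain left-to-right scan (proof-side reference point between B's hash scan and str.find)
def pvScanGo (chars w : List Char) (col r : Nat) : Option Nat :=
  match r with
  | 0 => none
  | r + 1 =>
    if (chars.drop col).take w.length = w then some col
    else pvScanGo chars w (col + 1) r

-- un-modded base-256 value of a char list, folded from accumulator a
def pvVal (a : Int) (l : List Char) : Int :=
  l.foldl (fun x c => x * 256 + (c.toNat : Int)) a

lemma pvMod_eq (x : Int) : PySem.Int.mod x 1000000007 = x % 1000000007 :=
  PySem.Int.mod_eq_emod_of_pos (by norm_num)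

lemma pvMod_mul_add (x y d : Int) (h : x % 1000000007 = y % 1000000007) :
    (x * 256 + d) % 1000000007 = (y * 256 + d) % 1000000007 := by
  have hx : x * 256 + d = (x % 1000000007) * 256 + d + 1000000007 * (256 * (x / 1000000007)) := by
    rw [Int.emod_def]; ring
  have hy : y * 256 + d = (y % 1000000007) * 256 + d + 1000000007 * (256 * (y / 1000000007)) := by
    rw [Int.emod_def]; ring
  rw [hx, hy, Int.add_mul_emod_self_left, Int.add_mul_emod_self_left, h]

lemma pvVal_split (l : List Char) (a : Int) :
    pvVal a l = a * 256 ^ l.length + pvVal 0 l := by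
  induction l generalizing a with
  | nil => simp [pvVal]
  | cons c t ih =>
    have h1 : pvVal a (c :: t) = pvVal (a * 256 + c.toNat) t := rfl
    have h2 : pvVal 0 (c :: t) = pvVal (0 * 256 + c.toNat) t := rfl
    rw [h1, h2, ih (a * 256 + c.toNat), ih (0 * 256 + c.toNat), List.length_cons]
    ring

lemma pvVal_append_singleton (m : List Char) (d : Char) :
    pvVal 0 (m ++ [d]) = pvVal 0 m * 256 + (d.toNat : Int) := by
  simp [pvVal, List.foldl_append]

lemma pvHash_foldl (l : List Char) (a : Int) :
    l.foldl pvHStep (a % 1000000007) = pvVal a l % 1000000007 := by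
  induction l generalizing a with
  | nil => simp [pvVal]
  | cons c t ih =>
    have hstep : pvHStep (a % 1000000007) c = (a * 256 + (c.toNat : Int)) % 1000000007 := by
      unfold pvHStep
      rw [pvMod_eq]
      exact pvMod_mul_add _ _ _ (Int.emod_emod_of_dvd a dvd_rfl)
    have h1 : pvVal a (c :: t) = pvVal (a * 256 + c.toNat) t := rfl
    show t.foldl pvHStep (pvHStep (a % 1000000007) c) = pvVal a (c :: t) % 1000000007
    rw [hstep, h1]
    exact ih (a * 256 + c.toNat)

lemma pvHash_eq_val (l : List Char) :
    l.foldl pvHStep 0 = pvVal 0 l % 1000000007 := by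
  have h := pvHash_foldl l 0
  rw [Int.zero_emod] at h
  exact h

-- congruence core of the rolling update
lemma pvRollCore (c v Q : Int) :
    ((c * Q + v) % 1000000007 - c * (Q % 1000000007)) % 1000000007 = v % 1000000007 := by
  have h : (c * Q + v) % 1000000007 - c * (Q % 1000000007)
      = v + 1000000007 * (c * (Q / 1000000007) - (c * Q + v) / 1000000007) := by
    rw [Int.emod_def (c * Q + v), Int.emod_def Q]; ring
  rw [h, Int.add_mul_emod_self_left]

-- rolling the window c :: m one step to the right onto m ++ [d]
lemma pvRoll (c d : Char) (m : List Char) :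
    PySem.Int.mod (((pvVal 0 (c :: m) % 1000000007) - (c.toNat : Int) * (((256 : Int) ^ m.length) % 1000000007)) * 256
        + (d.toNat : Int)) 1000000007
      = pvVal 0 (m ++ [d]) % 1000000007 := by
  rw [pvMod_eq, pvVal_append_singleton]
  have h1 : pvVal 0 (c :: m) = (c.toNat : Int) * 256 ^ m.length + pvVal 0 m := by
    have : pvVal 0 (c :: m) = pvVal (0 * 256 + c.toNat) m := rfl
    rw [this, pvVal_split m]
    ring
  rw [h1]
  exact pvMod_mul_add _ _ _ (pvRollCore (c.toNat : Int) (pvVal 0 m) ((256 : Int) ^ m.length))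

-- B's hash scan equals the plain scan, given the rolling-hash invariant
lemma pvRKGo_eq_scan (chars word : List Char) (hw pw : Int)
    (hhw : hw = pvVal 0 word % 1000000007)
    (hpw : pw = ((256 : Int) ^ (word.length - 1)) % 1000000007)
    (hwpos : 0 < word.length) (hwle : word.length ≤ chars.length) :
    ∀ (r col : Nat) (h : Int), col + r = chars.length - word.length + 1 →
      (r ≠ 0 → h = pvVal 0 ((chars.drop col).take word.length) % 1000000007) →
      pvRKGo chars word hw pw h col r = pvScanGo chars word col r := by
  intro r
  induction r with
  | zero => intro col h _ _; rfl
  | succ r ih =>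
    intro col h hcnt hinv
    have hh : h = pvVal 0 ((chars.drop col).take word.length) % 1000000007 := hinv (by omega)
    simp only [pvRKGo, pvScanGo]
    by_cases hwin : (chars.drop col).take word.length = word
    · rw [if_pos ⟨by rw [hh, hwin, hhw], hwin⟩, if_pos hwin]
    · rw [if_neg (fun hc => hwin hc.2), if_neg hwin]
      apply ih (col + 1) _ (by omega)
      intro hr0
      -- here r ≠ 0, so the rolling branch fires
      have hlt : col + word.length < chars.length := by omega
      have hcol : col < chars.length := by omega
      obtain ⟨k, hk⟩ : ∃ k, word.length = k + 1 := ⟨word.length - 1, by omega⟩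
      have hdrop : chars.drop col = chars[col] :: chars.drop (col + 1) :=
        List.drop_eq_getElem_cons hcol
      have hgd : chars.getD col ' ' = chars[col] := List.getD_eq_getElem chars ' ' hcol
      have hgd2 : chars.getD (col + word.length) ' ' = chars[col + word.length] :=
        List.getD_eq_getElem chars ' ' hlt
      have hwin_cons : (chars.drop col).take word.length
          = chars[col] :: (chars.drop (col + 1)).take k := by
        rw [hk, hdrop, List.take_succ_cons]
      have hml : ((chars.drop (col + 1)).take k).length = k := by
        rw [List.length_take]
        simp only [List.length_drop]
        omega
      have hidx : (chars.drop (col + 1))[k]? = some chars[col + word.length] := by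
        rw [List.getElem?_drop, (show col + 1 + k = col + word.length by omega),
          List.getElem?_eq_getElem hlt]
      have hnext : (chars.drop (col + 1)).take word.length
          = (chars.drop (col + 1)).take k ++ [chars[col + word.length]] := by
        conv_lhs => rw [hk, List.take_add_one]
        rw [hidx]
        rfl
      have hpw' : pw = ((256 : Int) ^ ((chars.drop (col + 1)).take k).length) % 1000000007 := by
        rw [hpw, hml, (show word.length - 1 = k by omega)]
      rw [if_pos hlt, hgd, hgd2, hh, hwin_cons, hnext, hpw']
      exact pvRoll chars[col] chars[col + word.length] ((chars.drop (col + 1)).take k)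

-- ===== plain scan ↔ PySem.Chars.find =====
lemma pv_take_eq_iff (l w : List Char) : l.take w.length = w ↔ w <+: l := by
  constructor
  · intro h; exact h ▸ List.take_prefix _ _
  · intro h; exact (List.prefix_iff_eq_take.mp h).symm

lemma pvScanGo_none (chars w : List Char) (col r : Nat)
    (h : ∀ i, ¬ w <+: chars.drop i) : pvScanGo chars w col r = none := by
  induction r generalizing col with
  | zero => rfl
  | succ r ih =>
    simp only [pvScanGo]
    rw [if_neg (fun he => h col ((pv_take_eq_iff _ _).mp he))]
    exact ih _

lemma pvScanGo_some (chars w : List Char) (k col r : Nat)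
    (hp : w <+: chars.drop k) (hmin : ∀ i < k, ¬ w <+: chars.drop i)
    (h1 : col ≤ k) (h2 : k < col + r) : pvScanGo chars w col r = some k := by
  induction r generalizing col with
  | zero => omega
  | succ r ih =>
    simp only [pvScanGo]
    by_cases hc : col = k
    · subst hc
      rw [if_pos ((pv_take_eq_iff _ _).mpr hp)]
    · rw [if_neg (fun he => hmin col (by omega) ((pv_take_eq_iff _ _).mp he))]
      exact ih (col + 1) (by omega) (by omega)

lemma pvScanRow_eq_find (chars w : List Char) :
    pvScanGo chars w 0 (chars.length - w.length + 1) =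
      (if PySem.Chars.find chars w = -1 then none else some (PySem.Chars.find chars w).toNat) := by
  by_cases hf : PySem.Chars.find chars w = -1
  · rw [if_pos hf]
    have hni : ¬ w <:+: chars := (PySem.Chars.find_eq_neg_one_iff chars w).mp hf
    refine pvScanGo_none chars w 0 _ (fun i hpre => ?_)
    exact hni ((PySem.Chars.isIn_iff_infix w chars).mp
        ((PySem.Chars.exists_prefix_drop_iff_isIn w chars).mp ⟨i, hpre⟩))
  · rw [if_neg hf]
    have h0 : 0 ≤ PySem.Chars.find chars w := by
      have := PySem.Chars.neg_one_le_find chars w; omega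
    obtain ⟨hp, hmin⟩ := PySem.Chars.find_spec (s := chars) (sub := w) h0
    set k := (PySem.Chars.find chars w).toNat with hk
    have hlen : w.length ≤ (chars.drop k).length := hp.length_le
    have hkl : k ≤ chars.length := by
      have := PySem.Chars.find_le_length chars w; omega
    refine pvScanGo_some chars w k 0 _ hp hmin (by omega) ?_
    simp only [List.length_drop] at hlen
    omega

-- "".join(row) flattens
lemma pv_join_nil_flatten (ls : List (List Char)) :
    PySem.Chars.join [] ls = ls.flatten := by
  induction ls with
  | nil => simp [PySem.Chars.join_nil]
  | cons p rest ih =>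
    cases rest with
    | nil => simp [PySem.Chars.join_singleton]
    | cons q r => rw [PySem.Chars.join_cons_cons, ih]; simp

lemma pv_toList_foldl (row : List String) (s : String) :
    (row.foldl (fun a c => a ++ c) s).toList = s.toList ++ (row.map String.toList).flatten := by
  induction row generalizing s with
  | nil => simp
  | cons c rest ih => simp [List.foldl, ih (s ++ c)]

-- ===== the row recursion =====
lemma pvRows_eq (word : String) (hw pw : Int)
    (hhw : hw = word.toList.foldl pvHStep 0)
    (hpw : pw = if 0 < word.toList.length then
        PySem.Int.powMod 256 (word.toList.length - 1) 1000000007 else 0) :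
    ∀ (rows : List (List String)) (n : Nat),
      pvARows rows word (n : Int) = pvAltRows rows word.toList hw pw n := by
  intro rows
  induction rows with
  | nil => intro n; rfl
  | cons row rest ih =>
    intro n
    simp only [pvARows, pvAltRows]
    have hchars : (row.foldl (fun s c => s ++ c) "").toList = (row.map String.toList).flatten := by
      simpa using pv_toList_foldl row ""
    set chars := PySem.Chars.join [] (row.map String.toList) with hcharsdef
    have hje : chars = (row.map String.toList).flatten := pv_join_nil_flatten _
    have hfind : PySem.Str.find (row.foldl (fun s c => s ++ c) "") word
        = PySem.Chars.find chars word.toList := by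
      rw [PySem.Str.find_eq, hchars, hje]
    have hih : pvARows rest word ((n : Int) + 1) = pvAltRows rest word.toList hw pw (n + 1) := by
      have := ih (n + 1); simpa [Int.natCast_add] using this
    by_cases hw0 : word.toList.length = 0
    · -- empty word: find returns 0, both sides yield [n, 0]
      have hnil : word.toList = [] := List.eq_nil_of_length_eq_zero hw0
      have hf0 : PySem.Chars.find chars word.toList = 0 := by
        rw [hnil]; exact PySem.Chars.find_nil chars
      rw [hfind, hf0, if_pos (show (0 : Int) ≠ -1 by norm_num),
          if_neg (show ¬ word.toList.length > chars.length by omega), if_pos hw0]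
    · by_cases hlong : word.toList.length > chars.length
      · -- word longer than the row: find = -1, both recurse
        have hni : ¬ word.toList <:+: chars := fun hinf => by
          have := hinf.length_le; omega
        have hf : PySem.Chars.find chars word.toList = -1 :=
          (PySem.Chars.find_eq_neg_one_iff chars word.toList).mpr hni
        rw [hfind, hf, if_neg (show ¬ (-1 : Int) ≠ -1 by simp), if_pos hlong]
        exact hih
      · -- 0 < w ≤ len: the hash scan equals the plain scan equals find
        have hwle : word.toList.length ≤ chars.length := by omega
        have hwpos : 0 < word.toList.length := by omega
        have hscan := pvRKGo_eq_scan chars word.toList hw pw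
            (by rw [hhw, pvHash_eq_val])
            (by rw [hpw, if_pos hwpos]; exact pvMod_eq _)
            hwpos hwle (chars.length - word.toList.length + 1) 0
            ((chars.take word.toList.length).foldl pvHStep 0)
            (by omega)
            (fun _ => by rw [pvHash_eq_val, List.drop_zero])
        rw [hfind, if_neg (show ¬ word.toList.length > chars.length by omega),
            if_neg hw0, hscan, pvScanRow_eq_find]
        by_cases hf : PySem.Chars.find chars word.toList = -1
        · rw [if_pos hf, if_neg (not_not_intro hf)]
          exact hih
        · rw [if_neg hf, if_pos (show PySem.Chars.find chars word.toList ≠ -1 from hf)]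
          have h0 : 0 ≤ PySem.Chars.find chars word.toList := by
            have := PySem.Chars.neg_one_le_find chars word.toList; omega
          simp [Int.toNat_of_nonneg h0]

-- ===== VERDICT (by name: the statement is the Claim_ definition above) =====
theorem find_word_horizontal_spec : Claim_equal_find_word_horizontal := by
  intro crosswords word _
  show find_word_horizontal crosswords word = find_word_horizontal_alt crosswords word
  unfold find_word_horizontal find_word_horizontal_alt
  have := pvRows_eq word (word.toList.foldl pvHStep 0)
    (if 0 < word.toList.length then
        PySem.Int.powMod 256 (word.toList.length - 1) 1000000007 else 0)
    rfl rfl crosswords 0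
  simpa using this
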